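-- pv_equiv track=rewrite | github.com/wuchen0901/algorithm | knapsack/item_count_optimization.py | knapsack_min_items_unbounded
-- ===== SOURCE A (Python) =====
-- from math import inf
-- from typing import Iterable, List
--
-- def _sanitize_weights(weights: Iterable[int], capacity: int) -> List[int]:
--     """Filter out non-positive weights and those exceeding capacity."""
--     if capacity <= 0:
--         return []
--     return [w for w in weights if 1 <= w <= capacity]
--
-- def knapsack_min_items_unbounded(weights: Iterable[int], target: int) -> int:
--     """
--     Unbounded knapsack: minimum number of items needed to reach ``target`` exactly.
--     Returns ``-1`` if ``target`` cannot be formed.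
--     """
--     valid = _sanitize_weights(weights, target)
--     if target == 0:
--         return 0
--     if not valid:
--         return -1
--     dp = [inf] * (target + 1)
--     dp[0] = 0
--     for weight in valid:
--         for total in range(weight, target + 1):
--             if dp[total - weight] != inf:
--                 dp[total] = min(dp[total], dp[total - weight] + 1)
--     return int(dp[target]) if dp[target] != inf else -1
-- ===== SOURCE B (Python) =====
-- from typing import Iterable, List
--
--
-- def _sanitize_weights(weights: Iterable[int], capacity: int) -> List[int]:
--     """Filter out non-positive weights and those exceeding capacity."""
--     if capacity <= 0:
--         return []
--     return [w for w in weights if 1 <= w <= capacity]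
--
--
-- def knapsack_min_items_unbounded(weights: Iterable[int], target: int) -> int:
--     """
--     Unbounded knapsack: minimum number of items needed to reach ``target`` exactly.
--     Returns ``-1`` if ``target`` cannot be formed.
--
--     Breadth-first search over reachable totals: level ``count`` holds exactly the
--     totals needing a minimum of ``count`` items, so the first level containing
--     ``target`` is the answer; unit edge costs make BFS depth the exact minimum.
--     """
--     valid = _sanitize_weights(weights, target)
--     if target == 0:
--         return 0
--     if not valid:
--         return -1
--     visited = {0}
--     frontier = {0}
--     for count in range(1, target + 1):
--         if any(s + w == target for s in frontier for w in valid):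
--             return count
--         nxt = {s + w for s in frontier for w in valid
--                if s + w < target and s + w not in visited}
--         if not nxt:
--             return -1
--         visited |= nxt
--         frontier = nxt
--     return -1
-- ===== Notes on version B (the rewrite author's own statement) =====
-- stated objective: alternative
-- what changed: B replaces A's dynamic-programming table (per-weight relaxation sweeps over an inf-initialised array) with a breadth-first search over reachable totals: frontier/visited sets expanded level by level, returning as soon as a level can hit the target, so it touches only reachable totals and stops at the answer's level instead of always filling the whole table.
import Mathlib
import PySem

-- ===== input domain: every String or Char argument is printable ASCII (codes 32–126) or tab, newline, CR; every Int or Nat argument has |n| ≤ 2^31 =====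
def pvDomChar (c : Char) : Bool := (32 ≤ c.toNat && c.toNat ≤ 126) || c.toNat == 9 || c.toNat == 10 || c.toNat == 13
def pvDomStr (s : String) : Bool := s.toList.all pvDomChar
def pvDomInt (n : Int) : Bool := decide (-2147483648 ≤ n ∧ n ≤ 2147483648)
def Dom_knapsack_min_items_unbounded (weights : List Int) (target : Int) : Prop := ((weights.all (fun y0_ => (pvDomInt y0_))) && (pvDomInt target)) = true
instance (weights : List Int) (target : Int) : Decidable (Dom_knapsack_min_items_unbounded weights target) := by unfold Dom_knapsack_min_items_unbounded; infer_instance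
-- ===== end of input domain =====

-- B replaces A's DP table with a breadth-first search over reachable totals
-- (frontier/visited sets expanded level by level); objective: alternative, same cost.

-- ===== PORT A =====
-- 'inf' is modelled as 'none'; 'min' with a possible inf as 'omin' (exact for the ints+inf A uses).
def omin : Option Int → Option Int → Option Int
  | none, b => b
  | some x, none => some x
  | some x, some y => some (min x y)

-- port of _sanitize_weights
def sanitize_weights (weights : List Int) (capacity : Int) : List Int :=
  if capacity ≤ 0 then []
  else weights.filter (fun w => decide (1 ≤ w) && decide (w ≤ capacity))

def knapsack_min_items_unbounded (weights : List Int) (target : Int) : Int :=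
  let valid := sanitize_weights weights target
  if target = 0 then 0
  else if valid = [] then -1
  else
    let T := target.toNat
    -- dp = [inf] * (target + 1); dp[0] = 0   (Python list = array)
    let dp0 : Array (Option Int) := (Array.replicate (T + 1) none).setIfInBounds 0 (some 0)
    -- for weight in valid: for total in range(weight, target + 1): …
    -- (range(weight, target+1) = range' weight.toNat (T + 1 - weight.toNat): exact since 1 ≤ weight ≤ target)
    let dp := valid.foldl (fun dp w =>
      (List.range' w.toNat (T + 1 - w.toNat)).foldl (fun dp total =>
        match dp.getD (total - w.toNat) none with
        | none => dp
        | some prev => dp.setIfInBounds total (omin (dp.getD total none) (some (prev + 1)))) dp) dp0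
    match dp.getD T none with
    | some v => v
    | none => -1

-- ===== PORT B =====
-- B's own copy of _sanitize_weights
def sanitize_weights_b (weights : List Int) (capacity : Int) : List Int :=
  if capacity ≤ 0 then []
  else weights.filter (fun w => decide (1 ≤ w) && decide (w ≤ capacity))

-- the 'for count in range(1, target+1)' BFS loop (early returns = the base/branch results)
def bfs (valid : List Int) (target : Int) : List Nat → PySem.Set Int → PySem.Set Int → Int
  | [], _, _ => -1
  | count :: rest, visited, frontier =>
    -- if any(s + w == target for s in frontier for w in valid): return count
    if frontier.any (fun s => valid.any (fun w => s + w == target)) then (count : Int)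
    else
      -- nxt = {s + w for s in frontier for w in valid if s + w < target and s + w not in visited}
      let nxt : PySem.Set Int := frontier.foldl (fun acc s =>
        valid.foldl (fun (acc : PySem.Set Int) w =>
          if s + w < target ∧ (s + w) ∉ visited then acc.add (s + w) else acc) acc)
        PySem.Set.empty
      if nxt = [] then -1
      else bfs valid target rest (PySem.Set.union visited nxt) nxt

def knapsack_min_items_unbounded_alt (weights : List Int) (target : Int) : Int :=
  let valid := sanitize_weights_b weights target
  if target = 0 then 0
  else if valid = [] then -1
  else
    -- visited = {0}; frontier = {0}; for count in range(1, target + 1): …; return -1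
    bfs valid target (List.range' 1 target.toNat) (PySem.Set.ofList [0]) (PySem.Set.ofList [0])

-- ===== PRECONDITION & SPEC =====
def Spec_knapsack_min_items_unbounded (weights : List Int) (target : Int) (out : Int) : Prop := out = knapsack_min_items_unbounded_alt weights target
instance (weights : List Int) (target : Int) (out : Int) : Decidable (Spec_knapsack_min_items_unbounded weights target out) := by unfold Spec_knapsack_min_items_unbounded; infer_instance

-- ===== CLAIM (what is proved, stated in full; the proofs are below) =====
def Claim_equal_knapsack_min_items_unbounded : Prop := ∀ (weights : List Int) (target : Int), Dom_knapsack_min_items_unbounded weights target → Spec_knapsack_min_items_unbounded weights target (knapsack_min_items_unbounded weights target)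

-- ===== LEMMAS AND PROOFS =====

-- encode Option Int (none = unreachable) as the -1 convention of the results
def enc : Option Int → Int
  | none => -1
  | some v => v

-- order on Option Int with none = +inf
def ole : Option Int → Option Int → Prop
  | _, none => True
  | none, some _ => False
  | some x, some y => x ≤ y

lemma ole_none (a : Option Int) : ole a none := by cases a <;> trivial

lemma ole_trans {a b c : Option Int} (h₁ : ole a b) (h₂ : ole b c) : ole a c := by
  cases a <;> cases b <;> cases c <;> simp_all [ole] <;> omega

lemma omin_none_right (a : Option Int) : omin a none = a := by cases a <;> rfl

lemma omin_comm (a b : Option Int) : omin a b = omin b a := by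
  cases a <;> cases b <;> simp [omin, Int.min_comm]

lemma omin_assoc (a b c : Option Int) : omin (omin a b) c = omin a (omin b c) := by
  cases a <;> cases b <;> cases c <;> simp [omin, Int.min_assoc]

lemma omin_eq_left {a b : Option Int} (h : ole a b) : omin a b = a := by
  cases a <;> cases b <;> simp_all [ole, omin] <;> omega

lemma omin_le_left (a b : Option Int) : ole (omin a b) a := by
  cases a <;> cases b <;> simp [ole, omin] <;> omega

lemma omin_le_right (a b : Option Int) : ole (omin a b) b := by
  cases a <;> cases b <;> simp [ole, omin] <;> omega

lemma le_omin {a b c : Option Int} (h₁ : ole a b) (h₂ : ole a c) : ole a (omin b c) := by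
  cases a <;> cases b <;> cases c <;> simp_all [ole, omin] <;> omega

lemma omin_map (a b : Option Int) :
    (omin a b).map (· + 1) = omin (a.map (· + 1)) (b.map (· + 1)) := by
  cases a <;> cases b <;> simp [omin] <;> omega

lemma ole_map {a b : Option Int} (h : ole a b) : ole (a.map (· + 1)) (b.map (· + 1)) := by
  cases a <;> cases b <;> simp_all [ole] <;> omega

lemma omin_interchange (a b x y : Option Int) :
    omin (omin a b) (omin x y) = omin (omin a x) (omin b y) := by
  cases a <;> cases b <;> cases x <;> cases y <;> simp [omin] <;> omega

lemma omin_eq_some {a b : Option Int} {v : Int} (h : omin a b = some v) :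
    a = some v ∨ b = some v := by
  cases a <;> cases b <;> simp_all [omin] <;> omega

-- big minimum of candidates
def bigmin (l : List Int) (c : Int → Option Int) : Option Int :=
  l.foldl (fun acc u => omin acc (c u)) none

lemma foldl_omin_shift (c : Int → Option Int) :
    ∀ (l : List Int) (a : Option Int),
      l.foldl (fun acc u => omin acc (c u)) a = omin a (bigmin l c) := by
  intro l
  induction l with
  | nil => intro a; exact (omin_none_right a).symm
  | cons u l ih =>
      intro a
      show l.foldl _ (omin a (c u)) = _
      rw [ih (omin a (c u))]
      have : bigmin (u :: l) c = omin (c u) (bigmin l c) := by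
        show l.foldl _ (omin none (c u)) = _
        rw [ih (omin none (c u))]
        rfl
      rw [this, omin_assoc]

lemma bigmin_cons (c : Int → Option Int) (u : Int) (l : List Int) :
    bigmin (u :: l) c = omin (c u) (bigmin l c) := by
  show l.foldl _ (omin none (c u)) = _
  rw [foldl_omin_shift]
  rfl

lemma bigmin_append (c : Int → Option Int) (l₁ l₂ : List Int) :
    bigmin (l₁ ++ l₂) c = omin (bigmin l₁ c) (bigmin l₂ c) := by
  show (l₁ ++ l₂).foldl _ none = _
  rw [List.foldl_append, foldl_omin_shift]
  rfl

lemma bigmin_le_mem {c : Int → Option Int} {u : Int} {l : List Int} (h : u ∈ l) :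
    ole (bigmin l c) (c u) := by
  induction l with
  | nil => cases h
  | cons v l ih =>
      rw [bigmin_cons]
      rcases List.mem_cons.1 h with rfl | h
      · exact omin_le_left _ _
      · exact ole_trans (omin_le_right _ _) (ih h)

lemma le_bigmin {a : Option Int} {c : Int → Option Int} {l : List Int}
    (h : ∀ u ∈ l, ole a (c u)) : ole a (bigmin l c) := by
  induction l with
  | nil => exact ole_none a
  | cons v l ih =>
      rw [bigmin_cons]
      exact le_omin (h v (List.mem_cons_self ..)) (ih fun u hu => h u (List.mem_cons_of_mem _ hu))

lemma bigmin_congr_mem {c c' : Int → Option Int} {l : List Int}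
    (h : ∀ u ∈ l, c u = c' u) : bigmin l c = bigmin l c' := by
  induction l with
  | nil => rfl
  | cons v l ih =>
      rw [bigmin_cons, bigmin_cons, h v (List.mem_cons_self ..),
        ih fun u hu => h u (List.mem_cons_of_mem _ hu)]

lemma bigmin_split (c₁ c₂ : Int → Option Int) (l : List Int) :
    bigmin l (fun u => omin (c₁ u) (c₂ u)) = omin (bigmin l c₁) (bigmin l c₂) := by
  induction l with
  | nil => rfl
  | cons v l ih =>
      rw [bigmin_cons, bigmin_cons, bigmin_cons, ih, omin_interchange]

lemma bigmin_forall_nonneg {c : Int → Option Int} {l : List Int}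
    (h : ∀ u ∈ l, ∀ v, c u = some v → 0 ≤ v) :
    ∀ v, bigmin l c = some v → 0 ≤ v := by
  induction l with
  | nil => intro v hv; cases hv
  | cons u l ih =>
      intro v hv
      rw [bigmin_cons] at hv
      have h₁ := h u (List.mem_cons_self ..)
      have h₂ := ih fun u hu => h u (List.mem_cons_of_mem _ hu)
      cases hc : c u <;> cases hb : bigmin l c <;> rw [hc, hb] at hv <;>
        simp [omin] at hv
      · have := h₂ _ hb; omega
      · have := h₁ _ hc; omega
      · have := h₁ _ hc; have := h₂ _ hb; omega

lemma bigmin_attained {c : Int → Option Int} {l : List Int} {v : Int}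
    (h : bigmin l c = some v) : ∃ u ∈ l, c u = some v := by
  induction l with
  | nil => cases h
  | cons u l ih =>
      rw [bigmin_cons] at h
      rcases omin_eq_some h with h | h
      · exact ⟨u, List.mem_cons_self .., h⟩
      · obtain ⟨x, hx, hcx⟩ := ih h
        exact ⟨x, List.mem_cons_of_mem _ hx, hcx⟩

-- reference recurrence: Fa ws fuel t = minimal number of items from ws summing to t
-- (fuel-indexed; fuel ≥ t suffices)
def Fa (ws : List Int) : Nat → Nat → Option Int
  | _, 0 => some 0
  | 0, _ + 1 => none
  | fuel + 1, t + 1 =>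
    ws.foldl (fun acc u =>
      if 1 ≤ u ∧ u ≤ ((t + 1 : Nat) : Int) then
        omin acc ((Fa ws fuel (t + 1 - u.toNat)).map (· + 1))
      else acc) none

def F (ws : List Int) (t : Nat) : Option Int := Fa ws t t

lemma Fa_zero (ws : List Int) (fuel : Nat) : Fa ws fuel 0 = some 0 := by
  cases fuel <;> rfl

lemma F_zero (ws : List Int) : F ws 0 = some 0 := rfl

lemma Fa_irrel (ws : List Int) :
    ∀ (t f₁ f₂ : Nat), t ≤ f₁ → t ≤ f₂ → Fa ws f₁ t = Fa ws f₂ t := by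
  intro t
  induction t using Nat.strong_induction_on with
  | _ t ih =>
    intro f₁ f₂ h₁ h₂
    match t, f₁, f₂ with
    | 0, f₁, f₂ => rw [Fa_zero, Fa_zero]
    | t + 1, g₁ + 1, g₂ + 1 =>
      show ws.foldl _ none = ws.foldl _ none
      have hfun : (fun (acc : Option Int) u =>
            if 1 ≤ u ∧ u ≤ ((t + 1 : Nat) : Int) then
              omin acc ((Fa ws g₁ (t + 1 - u.toNat)).map (· + 1))
            else acc)
          = (fun (acc : Option Int) u =>
            if 1 ≤ u ∧ u ≤ ((t + 1 : Nat) : Int) then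
              omin acc ((Fa ws g₂ (t + 1 - u.toNat)).map (· + 1))
            else acc) := by
        funext acc u
        split_ifs with h
        · rw [ih (t + 1 - u.toNat) (by omega) g₁ g₂ (by omega) (by omega)]
        · rfl
      rw [hfun]

lemma F_unfold (ws : List Int) (t : Nat) (ht : 0 < t) :
    F ws t = bigmin ws (fun u =>
      if 1 ≤ u ∧ u ≤ (t : Int) then (F ws (t - u.toNat)).map (· + 1) else none) := by
  obtain ⟨s, rfl⟩ : ∃ s, t = s + 1 := ⟨t - 1, by omega⟩
  show ws.foldl _ none = _
  have hfun : (fun (acc : Option Int) u =>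
        if 1 ≤ u ∧ u ≤ ((s + 1 : Nat) : Int) then
          omin acc ((Fa ws s (s + 1 - u.toNat)).map (· + 1))
        else acc)
      = (fun (acc : Option Int) u =>
        omin acc (if 1 ≤ u ∧ u ≤ ((s + 1 : Nat) : Int) then
          (F ws (s + 1 - u.toNat)).map (· + 1) else none)) := by
    funext acc u
    split_ifs with h
    · rw [Fa_irrel ws (s + 1 - u.toNat) s (s + 1 - u.toNat) (by omega) le_rfl]; rfl
    · exact (omin_none_right acc).symm
  rw [hfun]
  rfl

lemma F_nonneg (ws : List Int) : ∀ (t : Nat) (v : Int), F ws t = some v → 0 ≤ v := by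
  intro t
  induction t using Nat.strong_induction_on with
  | _ t ih =>
    intro v hv
    rcases Nat.eq_zero_or_pos t with rfl | ht
    · rw [F_zero] at hv; cases hv; omega
    · rw [F_unfold ws t ht] at hv
      refine bigmin_forall_nonneg ?_ v hv
      intro u _ x hx
      split_ifs at hx with h
      · cases hF : F ws (t - u.toNat) <;> rw [hF] at hx
        · cases hx
        · simp at hx
          have := ih (t - u.toNat) (by omega) _ hF
          omega

lemma F_le_cand (ws : List Int) {u : Int} (hu : u ∈ ws) (h1 : 1 ≤ u) {s : Nat}
    (hus : u.toNat ≤ s) :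
    ole (F ws s) ((F ws (s - u.toNat)).map (· + 1)) := by
  have hs : 0 < s := by omega
  rw [F_unfold ws s hs]
  have h := bigmin_le_mem (c := fun u =>
    if 1 ≤ u ∧ u ≤ (s : Int) then (F ws (s - u.toNat)).map (· + 1) else none) hu
  simpa [h1, show u ≤ (s : Int) from by omega] using h

-- if F t = some v with t > 0, some weight attains it: v = F (t - u) + 1
lemma F_attained (ws : List Int) {t : Nat} (ht : 0 < t) {v : Int}
    (hv : F ws t = some v) :
    ∃ u ∈ ws, 1 ≤ u ∧ u ≤ (t : Int) ∧ F ws (t - u.toNat) = some (v - 1) := by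
  rw [F_unfold ws t ht] at hv
  obtain ⟨u, hu, hcu⟩ := bigmin_attained hv
  split_ifs at hcu with h
  · cases hF : F ws (t - u.toNat) <;> rw [hF] at hcu
    · cases hcu
    · simp at hcu
      exact ⟨u, hu, h.1, h.2, by rw [hF]; congr 1; omega⟩

lemma F_le_self (ws : List Int) : ∀ (t : Nat) (v : Int), F ws t = some v → v ≤ (t : Int) := by
  intro t
  induction t using Nat.strong_induction_on with
  | _ t ih =>
    intro v hv
    rcases Nat.eq_zero_or_pos t with rfl | ht
    · rw [F_zero] at hv; cases hv; simp
    · obtain ⟨u, _, hu1, hut, hF⟩ := F_attained ws ht hv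
      have hlt : t - u.toNat < t := by omega
      have := ih (t - u.toNat) hlt _ hF
      have hcast : ((t - u.toNat : Nat) : Int) = (t : Int) - u.toNat := by
        have : u.toNat ≤ t := by omega
        omega
      rw [hcast] at this
      omega

lemma F_eq_zero (ws : List Int) {t : Nat} (hv : F ws t = some 0) : t = 0 := by
  by_contra h
  obtain ⟨u, _, _, _, hF⟩ := F_attained ws (by omega) hv
  have := F_nonneg ws _ _ hF
  omega

-- the table A maintains while sweeping weight w over a table equal to F p
def Hh (p : List Int) (w : Int) : Nat → Nat → Option Int
  | 0, t => if t < w.toNat then F p t else none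
  | fuel + 1, t =>
    if t < w.toNat then F p t
    else omin (F p t) ((Hh p w fuel (t - w.toNat)).map (· + 1))

def H (p : List Int) (w : Int) (t : Nat) : Option Int := Hh p w t t

lemma Hh_irrel (p : List Int) (w : Int) (hw : 1 ≤ w) :
    ∀ (t f₁ f₂ : Nat), t ≤ f₁ → t ≤ f₂ → Hh p w f₁ t = Hh p w f₂ t := by
  intro t
  induction t using Nat.strong_induction_on with
  | _ t ih =>
    intro f₁ f₂ h₁ h₂
    by_cases hlt : t < w.toNat
    · cases f₁ <;> cases f₂ <;> simp [Hh, hlt]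
    · have ht : 1 ≤ t := by omega
      obtain ⟨g₁, rfl⟩ : ∃ g, f₁ = g + 1 := ⟨f₁ - 1, by omega⟩
      obtain ⟨g₂, rfl⟩ : ∃ g, f₂ = g + 1 := ⟨f₂ - 1, by omega⟩
      simp only [Hh, if_neg hlt]
      rw [ih (t - w.toNat) (by omega) g₁ g₂ (by omega) (by omega)]

lemma H_lt {p : List Int} {w : Int} {t : Nat} (h : t < w.toNat) : H p w t = F p t := by
  cases t <;> simp [H, Hh, h]

lemma H_ge {p : List Int} {w : Int} (hw : 1 ≤ w) {t : Nat} (h : w.toNat ≤ t) :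
    H p w t = omin (F p t) ((H p w (t - w.toNat)).map (· + 1)) := by
  have ht : 1 ≤ t := by omega
  match t, h with
  | s + 1, h =>
    show Hh p w (s + 1) (s + 1) = _
    simp only [Hh, if_neg (by omega : ¬ s + 1 < w.toNat)]
    rw [Hh_irrel p w hw (s + 1 - w.toNat) s (s + 1 - w.toNat) (by omega) le_rfl]
    rfl

lemma H_step (p : List Int) (w u : Int) (hw : 1 ≤ w) (hu : u ∈ p) (h1 : 1 ≤ u) :
    ∀ (s : Nat), u.toNat ≤ s → ole (H p w s) ((H p w (s - u.toNat)).map (· + 1)) := by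
  intro s
  induction s using Nat.strong_induction_on with
  | _ s ih =>
    intro hus
    have hcand := F_le_cand p hu h1 hus
    by_cases hlt : s < w.toNat
    · rw [H_lt hlt, H_lt (show s - u.toNat < w.toNat by omega)]
      exact hcand
    · rw [H_ge hw (by omega)]
      by_cases h2 : s - u.toNat < w.toNat
      · rw [H_lt h2]
        exact ole_trans (omin_le_left _ _) hcand
      · rw [H_ge hw (show w.toNat ≤ s - u.toNat by omega), omin_map]
        refine le_omin (ole_trans (omin_le_left _ _) hcand) ?_
        refine ole_trans (omin_le_right _ _) ?_
        refine ole_map ?_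
        rw [show s - u.toNat - w.toNat = s - w.toNat - u.toNat by omega]
        exact ih (s - w.toNat) (by omega) (by omega)

-- KEY (A side): sweeping w over the F p table yields the F (p ++ [w]) table
lemma H_eq_F_append (p : List Int) (w : Int) (hp : ∀ x ∈ p, 1 ≤ x) (hw : 1 ≤ w) :
    ∀ t, H p w t = F (p ++ [w]) t := by
  intro t
  induction t using Nat.strong_induction_on with
  | _ t ih =>
    rcases Nat.eq_zero_or_pos t with rfl | ht
    · rw [H_lt (by omega), F_zero, F_zero]
    · rw [F_unfold _ t ht]
      have hc : ∀ x ∈ p ++ [w],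
          (if 1 ≤ x ∧ x ≤ (t : Int) then (F (p ++ [w]) (t - x.toNat)).map (· + 1) else none)
          = (if 1 ≤ x ∧ x ≤ (t : Int) then (H p w (t - x.toNat)).map (· + 1) else none) := by
        intro x _
        split_ifs with h
        · rw [ih (t - x.toNat) (by omega)]
        · rfl
      rw [bigmin_congr_mem hc, bigmin_append]
      by_cases hlt : t < w.toNat
      · have hw0 : (if 1 ≤ w ∧ w ≤ (t : Int) then (H p w (t - w.toNat)).map (· + 1) else none)
            = none := if_neg (by omega)
        have hsing : bigmin [w] (fun x => if 1 ≤ x ∧ x ≤ (t : Int) then (H p w (t - x.toNat)).map (· + 1) else none) = none := by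
          rw [bigmin_cons, hw0]; rfl
        have hbp : bigmin p (fun x => if 1 ≤ x ∧ x ≤ (t : Int) then (H p w (t - x.toNat)).map (· + 1) else none)
            = F p t := by
          rw [F_unfold p t ht]
          refine (bigmin_congr_mem ?_)
          intro x _
          split_ifs with h
          · rw [H_lt (show t - x.toNat < w.toNat by omega)]
          · rfl
        rw [hsing, hbp, omin_none_right, H_lt hlt]
      · have hwt : w.toNat ≤ t := by omega
        rw [H_ge hw hwt]
        have hsing : bigmin [w] (fun x => if 1 ≤ x ∧ x ≤ (t : Int) then (H p w (t - x.toNat)).map (· + 1) else none)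
            = (H p w (t - w.toNat)).map (· + 1) := by
          rw [bigmin_cons, if_pos ⟨hw, by omega⟩]
          exact omin_none_right _
        have hsplit : ∀ x ∈ p,
            (if 1 ≤ x ∧ x ≤ (t : Int) then (H p w (t - x.toNat)).map (· + 1) else none)
            = omin (if 1 ≤ x ∧ x ≤ (t : Int) then (F p (t - x.toNat)).map (· + 1) else none)
                   (if 1 ≤ x ∧ x ≤ (t : Int) ∧ w.toNat ≤ t - x.toNat then
                      ((H p w (t - x.toNat - w.toNat)).map (· + 1)).map (· + 1) else none) := by
          intro x _
          by_cases h : 1 ≤ x ∧ x ≤ (t : Int)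
          · rw [if_pos h, if_pos h]
            by_cases h2 : w.toNat ≤ t - x.toNat
            · rw [if_pos ⟨h.1, h.2, h2⟩, H_ge hw h2, omin_map]
            · rw [if_neg (by tauto), H_lt (by omega), omin_none_right]
          · rw [if_neg h, if_neg h, if_neg (by tauto)]; rfl
        rw [bigmin_congr_mem hsplit, bigmin_split]
        have hF : bigmin p (fun x => if 1 ≤ x ∧ x ≤ (t : Int) then (F p (t - x.toNat)).map (· + 1) else none)
            = F p t := (F_unfold p t ht).symm
        rw [hF, hsing]
        have hle : ole ((H p w (t - w.toNat)).map (· + 1))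
            (bigmin p (fun x => if 1 ≤ x ∧ x ≤ (t : Int) ∧ w.toNat ≤ t - x.toNat then
              ((H p w (t - x.toNat - w.toNat)).map (· + 1)).map (· + 1) else none)) := by
          refine le_bigmin ?_
          intro x hx
          by_cases h : 1 ≤ x ∧ x ≤ (t : Int) ∧ w.toNat ≤ t - x.toNat
          · rw [if_pos h, show t - x.toNat - w.toNat = t - w.toNat - x.toNat by omega]
            exact ole_map (H_step p w x hw hx h.1 (t - w.toNat) (by omega))
          · rw [if_neg h]; exact ole_none _
        rw [omin_assoc, omin_comm (bigmin p _) ((H p w (t - w.toNat)).map (· + 1)), omin_eq_left hle]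

-- list plumbing for A's table
lemma getD_set_self {α : Type} (l : List α) (i : Nat) (a d : α) (h : i < l.length) :
    (l.set i a).getD i d = a := by
  simp [List.getD_eq_getElem?_getD, List.getElem?_set, h]

lemma getD_set_ne {α : Type} (l : List α) {i j : Nat} (a d : α) (h : i ≠ j) :
    (l.set i a).getD j d = l.getD j d := by
  simp [List.getD_eq_getElem?_getD, List.getElem?_set_ne h]

-- A's inner sweep of weight w turns an F p table into an H p w table
lemma innerA (p : List Int) (w : Int) (T : Nat) (hw1 : 1 ≤ w) :
    ∀ (k : Nat), w.toNat + k ≤ T + 1 → ∀ (dp : List (Option Int)), dp.length = T + 1 →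
      (∀ t, t ≤ T → dp.getD t none = if t < w.toNat then H p w t else F p t) →
      (((List.range' w.toNat k).foldl (fun dp total =>
          match dp.getD (total - w.toNat) none with
          | none => dp
          | some prev => dp.set total (omin (dp.getD total none) (some (prev + 1)))) dp).length = T + 1 ∧
      (∀ t, t ≤ T → ((List.range' w.toNat k).foldl (fun dp total =>
          match dp.getD (total - w.toNat) none with
          | none => dp
          | some prev => dp.set total (omin (dp.getD total none) (some (prev + 1)))) dp).getD t none
        = if t < w.toNat + k then H p w t else F p t)) := by
  intro k
  induction k with
  | zero =>
      intro _ dp hlen hdp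
      exact ⟨hlen, by simpa using hdp⟩
  | succ k ih =>
      intro hk dp hlen hdp
      obtain ⟨hlen₁, hdp₁⟩ := ih (by omega) dp hlen hdp
      have hwn : 1 ≤ w.toNat := by omega
      rw [List.range'_concat, List.foldl_append]
      set dp₁ := (List.range' w.toNat k).foldl (fun dp total =>
          match dp.getD (total - w.toNat) none with
          | none => dp
          | some prev => dp.set total (omin (dp.getD total none) (some (prev + 1)))) dp with hdp₁def
      have hm1 : w.toNat + 1 * k = w.toNat + k := by omega
      rw [hm1]
      simp only [List.foldl_cons, List.foldl_nil]
      have hmT : w.toNat + k ≤ T := by omega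
      have hread : dp₁.getD (w.toNat + k - w.toNat) none = H p w k := by
        rw [show w.toNat + k - w.toNat = k by omega, hdp₁ k (by omega), if_pos (by omega)]
      have hcur : dp₁.getD (w.toNat + k) none = F p (w.toNat + k) := by
        rw [hdp₁ (w.toNat + k) hmT, if_neg (by omega)]
      have hHm : H p w (w.toNat + k) = omin (F p (w.toNat + k)) ((H p w k).map (· + 1)) := by
        rw [H_ge hw1 (by omega), show w.toNat + k - w.toNat = k by omega]
      rw [hread]
      cases hk0 : H p w k with
      | none =>
          refine ⟨hlen₁, ?_⟩
          intro t ht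
          by_cases hteq : t = w.toNat + k
          · subst hteq
            rw [hcur, if_pos (by omega), hHm, hk0]
            cases F p (w.toNat + k) <;> rfl
          · rw [hdp₁ t ht]
            by_cases h1 : t < w.toNat + k
            · rw [if_pos h1, if_pos (by omega)]
            · rw [if_neg h1, if_neg (by omega)]
      | some prev =>
          constructor
          · rw [List.length_set, hlen₁]
          · intro t ht
            by_cases hteq : t = w.toNat + k
            · subst hteq
              rw [getD_set_self _ _ _ _ (by rw [hlen₁]; omega), hcur, if_pos (by omega), hHm, hk0]
              rfl
            · rw [getD_set_ne _ _ _ (fun h => hteq h.symm), hdp₁ t ht]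
              by_cases h1 : t < w.toNat + k
              · rw [if_pos h1, if_pos (by omega)]
              · rw [if_neg h1, if_neg (by omega)]

-- A's outer loop over the weights
lemma outerA (T : Nat) :
    ∀ (rest p : List Int), (∀ u ∈ rest, 1 ≤ u ∧ u ≤ (T : Int)) → (∀ u ∈ p, 1 ≤ u) →
      ∀ (dp : List (Option Int)), dp.length = T + 1 →
      (∀ t, t ≤ T → dp.getD t none = F p t) →
      ((rest.foldl (fun dp w =>
        (List.range' w.toNat (T + 1 - w.toNat)).foldl (fun dp total =>
          match dp.getD (total - w.toNat) none with
          | none => dp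
          | some prev => dp.set total (omin (dp.getD total none) (some (prev + 1)))) dp) dp).length = T + 1 ∧
      ∀ t, t ≤ T → (rest.foldl (fun dp w =>
        (List.range' w.toNat (T + 1 - w.toNat)).foldl (fun dp total =>
          match dp.getD (total - w.toNat) none with
          | none => dp
          | some prev => dp.set total (omin (dp.getD total none) (some (prev + 1)))) dp) dp).getD t none = F (p ++ rest) t) := by
  intro rest
  induction rest with
  | nil =>
      intro p _ _ dp hlen hdp
      exact ⟨hlen, by simpa using hdp⟩
  | cons w rest ih =>
      intro p hrest hp dp hlen hdp
      obtain ⟨hw1, hwT⟩ := hrest w (List.mem_cons_self ..)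
      have hwn : w.toNat ≤ T := by omega
      rw [List.foldl_cons]
      obtain ⟨hlen₁, hdp₁⟩ := innerA p w T hw1 (T + 1 - w.toNat) (by omega) dp hlen
        (by
          intro t ht
          rw [hdp t ht]
          split_ifs with h
          · rw [H_lt h]
          · rfl)
      have hkey := H_eq_F_append p w hp hw1
      have hdp₁' : ∀ t, t ≤ T →
          ((List.range' w.toNat (T + 1 - w.toNat)).foldl (fun dp total =>
            match dp.getD (total - w.toNat) none with
            | none => dp
            | some prev => dp.set total (omin (dp.getD total none) (some (prev + 1)))) dp).getD t none
          = F (p ++ [w]) t := by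
        intro t ht
        rw [hdp₁ t ht, if_pos (by omega), hkey t]
      obtain ⟨hlen₂, hdp₂⟩ := ih (p ++ [w])
        (fun u hu => hrest u (List.mem_cons_of_mem _ hu))
        (by
          intro u hu
          rcases List.mem_append.1 hu with h | h
          · exact hp u h
          · rcases List.mem_singleton.1 h with rfl; exact hw1)
        _ hlen₁ hdp₁'
      refine ⟨hlen₂, ?_⟩
      intro t ht
      rw [hdp₂ t ht, List.append_assoc, List.singleton_append]

-- initial table of A is the F [] table
lemma initA (T : Nat) : ∀ t, t ≤ T → (some 0 :: List.replicate T (none : Option Int)).getD t none = F [] t := by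
  intro t ht
  cases t with
  | zero => rfl
  | succ s =>
      have h1 : (some 0 :: List.replicate T (none : Option Int)).getD (s + 1) none
          = (List.replicate T (none : Option Int)).getD s none := rfl
      have h2 : (List.replicate T (none : Option Int)).getD s none = none := by
        simp [List.getD_eq_getElem?_getD, List.getElem?_replicate]
        split_ifs <;> rfl
      have h3 : F [] (s + 1) = none := rfl
      rw [h1, h2, h3]

-- bridge: the Array folds of A's port project (via toList) onto the List folds above
lemma arr_getD {α : Type} (a : Array α) (i : Nat) (d : α) : a.getD i d = a.toList.getD i d := by
  rw [Array.getD_eq_getD_getElem?, List.getD_eq_getElem?_getD, Array.getElem?_toList]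

lemma toList_innerA_fold (w : Int) (l : List Nat) :
    ∀ (a : Array (Option Int)),
      (l.foldl (fun dp total =>
        match dp.getD (total - w.toNat) none with
        | none => dp
        | some prev => dp.setIfInBounds total (omin (dp.getD total none) (some (prev + 1)))) a).toList
      = l.foldl (fun dp total =>
        match dp.getD (total - w.toNat) none with
        | none => dp
        | some prev => dp.set total (omin (dp.getD total none) (some (prev + 1)))) a.toList := by
  induction l with
  | nil => intro a; rfl
  | cons t l ih =>
      intro a
      rw [List.foldl_cons, List.foldl_cons, ih]
      have hstep : (match a.getD (t - w.toNat) none with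
          | none => a
          | some prev => a.setIfInBounds t (omin (a.getD t none) (some (prev + 1)))).toList
          = match a.toList.getD (t - w.toNat) none with
          | none => a.toList
          | some prev => a.toList.set t (omin (a.toList.getD t none) (some (prev + 1))) := by
        rw [arr_getD]
        cases a.toList.getD (t - w.toNat) none with
        | none => rfl
        | some prev => rw [Array.toList_setIfInBounds, arr_getD]
      rw [hstep]

lemma toList_outerA_fold (T : Nat) (ws : List Int) :
    ∀ (a : Array (Option Int)),
      (ws.foldl (fun dp w =>
        (List.range' w.toNat (T + 1 - w.toNat)).foldl (fun dp total =>
          match dp.getD (total - w.toNat) none with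
          | none => dp
          | some prev => dp.setIfInBounds total (omin (dp.getD total none) (some (prev + 1)))) dp) a).toList
      = ws.foldl (fun dp w =>
        (List.range' w.toNat (T + 1 - w.toNat)).foldl (fun dp total =>
          match dp.getD (total - w.toNat) none with
          | none => dp
          | some prev => dp.set total (omin (dp.getD total none) (some (prev + 1)))) dp) a.toList := by
  induction ws with
  | nil => intro a; rfl
  | cons w ws ih =>
      intro a
      rw [List.foldl_cons, List.foldl_cons, ih, toList_innerA_fold]

-- ===== B-side lemmas =====

-- membership in the inner comprehension fold
lemma mem_innerB (target s : Int) (visited : PySem.Set Int) :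
    ∀ (l : List Int) (acc : PySem.Set Int) (y : Int),
      y ∈ l.foldl (fun (acc : PySem.Set Int) w =>
        if s + w < target ∧ (s + w) ∉ visited then acc.add (s + w) else acc) acc ↔
      y ∈ acc ∨ ∃ w ∈ l, s + w < target ∧ (s + w) ∉ visited ∧ y = s + w := by
  intro l
  induction l with
  | nil => intro acc y; simp
  | cons w l ih =>
      intro acc y
      rw [List.foldl_cons, ih]
      by_cases h : s + w < target ∧ (s + w) ∉ visited
      · rw [if_pos h, PySem.Set.mem_add]
        constructor
        · rintro (⟨hy | rfl⟩ | ⟨x, hx, h1, h2, rfl⟩)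
          · exact Or.inl hy
          · exact Or.inr ⟨w, List.mem_cons_self .., h.1, h.2, rfl⟩
          · exact Or.inr ⟨x, List.mem_cons_of_mem _ hx, h1, h2, rfl⟩
        · rintro (hy | ⟨x, hx, h1, h2, rfl⟩)
          · exact Or.inl (Or.inl hy)
          · rcases List.mem_cons.1 hx with rfl | hx
            · exact Or.inl (Or.inr rfl)
            · exact Or.inr ⟨x, hx, h1, h2, rfl⟩
      · rw [if_neg h]
        constructor
        · rintro (hy | ⟨x, hx, h1, h2, rfl⟩)
          · exact Or.inl hy
          · exact Or.inr ⟨x, List.mem_cons_of_mem _ hx, h1, h2, rfl⟩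
        · rintro (hy | ⟨x, hx, h1, h2, rfl⟩)
          · exact Or.inl hy
          · rcases List.mem_cons.1 hx with rfl | hx
            · exact absurd ⟨h1, h2⟩ h
            · exact Or.inr ⟨x, hx, h1, h2, rfl⟩

lemma mem_nxtB (valid : List Int) (target : Int) (visited : PySem.Set Int) :
    ∀ (fl : List Int) (acc : PySem.Set Int) (y : Int),
      y ∈ fl.foldl (fun acc s =>
        valid.foldl (fun (acc : PySem.Set Int) w =>
          if s + w < target ∧ (s + w) ∉ visited then acc.add (s + w) else acc) acc) acc ↔
      y ∈ acc ∨ ∃ s ∈ fl, ∃ w ∈ valid, s + w < target ∧ (s + w) ∉ visited ∧ y = s + w := by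
  intro fl
  induction fl with
  | nil => intro acc y; simp
  | cons s fl ih =>
      intro acc y
      rw [List.foldl_cons, ih, mem_innerB]
      constructor
      · rintro (⟨hy | ⟨w, hw, h1, h2, rfl⟩⟩ | ⟨x, hx, w, hw, h1, h2, rfl⟩)
        · exact Or.inl hy
        · exact Or.inr ⟨s, List.mem_cons_self .., w, hw, h1, h2, rfl⟩
        · exact Or.inr ⟨x, List.mem_cons_of_mem _ hx, w, hw, h1, h2, rfl⟩
      · rintro (hy | ⟨x, hx, w, hw, h1, h2, rfl⟩)
        · exact Or.inl (Or.inl hy)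
        · rcases List.mem_cons.1 hx with rfl | hx
          · exact Or.inl (Or.inr ⟨w, hw, h1, h2, rfl⟩)
          · exact Or.inr ⟨x, hx, w, hw, h1, h2, rfl⟩

-- once a whole level ≤ target is empty, all later levels are empty too
lemma levels_empty (valid : List Int) (T : Nat) (k : Nat)
    (hk : ∀ t : Nat, t ≤ T → F valid t ≠ some ((k + 1 : Nat) : Int)) :
    ∀ m : Nat, k + 1 ≤ m → ∀ t : Nat, t ≤ T → F valid t ≠ some ((m : Nat) : Int) := by
  intro m hm
  induction m, hm using Nat.le_induction with
  | base => exact hk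
  | succ m hm ih =>
      intro t ht hF
      have ht0 : 0 < t := by
        rcases Nat.eq_zero_or_pos t with rfl | h
        · rw [F_zero] at hF
          simp at hF
          omega
        · exact h
      obtain ⟨u, _, hu1, hut, hFp⟩ := F_attained valid ht0 hF
      have : ((m + 1 : Nat) : Int) - 1 = ((m : Nat) : Int) := by push_cast; ring
      rw [this] at hFp
      exact ih (t - u.toNat) (by omega) hFp

-- the BFS loop computes enc (F valid target.toNat)
lemma bfs_correct (valid : List Int) (target : Int)
    (hval : ∀ u ∈ valid, 1 ≤ u ∧ u ≤ target) (htpos : 0 < target) :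
    ∀ (n k : Nat) (visited frontier : PySem.Set Int),
      (∀ t : Int, t ∈ frontier ↔ 0 ≤ t ∧ t < target ∧ F valid t.toNat = some ((k : Nat) : Int)) →
      (∀ t : Int, t ∈ visited ↔ 0 ≤ t ∧ t < target ∧ ∃ j : Nat, j ≤ k ∧ F valid t.toNat = some ((j : Nat) : Int)) →
      (∀ j : Nat, j ≤ k → F valid target.toNat ≠ some ((j : Nat) : Int)) →
      (∀ m : Int, F valid target.toNat = some m → m ≤ (k : Int) + n) →
      bfs valid target (List.range' (k + 1) n) visited frontier = enc (F valid target.toNat) := by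
  intro n
  induction n with
  | zero =>
      intro k visited frontier _ _ hmiss hbound
      show (-1 : Int) = enc (F valid target.toNat)
      cases hF : F valid target.toNat with
      | none => rfl
      | some m =>
          exfalso
          have h0 := F_nonneg valid _ _ hF
          have h1 := hbound m hF
          have : ((m.toNat : Nat) : Int) = m := by omega
          exact hmiss m.toNat (by omega) (by rw [hF, this])
  | succ n ih =>
      intro k visited frontier hfr hvis hmiss hbound
      rw [show List.range' (k + 1) (n + 1) = (k + 1) :: List.range' (k + 1 + 1) n from rfl]
      show bfs valid target ((k + 1) :: List.range' (k + 2) n) visited frontier = _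
      rw [bfs]
      by_cases hhit : ∃ s ∈ frontier, ∃ w ∈ valid, s + w = target
      · -- hit: F target.toNat = k+1 and B returns k+1
        obtain ⟨s, hs, w, hw, hsw⟩ := hhit
        rw [if_pos (by simp only [List.any_eq_true, beq_iff_eq]; exact ⟨s, hs, w, hw, hsw⟩)]
        obtain ⟨hs0, hst, hsF⟩ := (hfr s).1 hs
        obtain ⟨hw1, hwt⟩ := hval w hw
        have hwT : w.toNat ≤ target.toNat := by omega
        have hsub : target.toNat - w.toNat = s.toNat := by omega
        have hcand := F_le_cand valid hw hw1 hwT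
        rw [hsub, hsF] at hcand
        cases hF : F valid target.toNat with
        | none => rw [hF] at hcand; exact absurd hcand (by simp [ole])
        | some v =>
            rw [hF] at hcand
            have hle : v ≤ (k : Int) + 1 := by simpa [ole] using hcand
            have h0 := F_nonneg valid _ _ hF
            have hv : v = (k : Int) + 1 := by
              by_contra hne
              have : v ≤ (k : Int) := by omega
              have : ((v.toNat : Nat) : Int) = v := by omega
              exact hmiss v.toNat (by omega) (by rw [hF, this])
            rw [hv]
            show ((k + 1 : Nat) : Int) = enc (some ((k : Int) + 1))
            simp [enc]
      · -- no hit: F target.toNat ≠ k+1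
        rw [if_neg (by simp only [List.any_eq_true, beq_iff_eq]; exact fun h => hhit h)]
        have hmiss' : F valid target.toNat ≠ some (((k + 1 : Nat) : Nat) : Int) := by
          intro hF
          have ht0 : 0 < target.toNat := by omega
          obtain ⟨u, hu, hu1, hut, hFp⟩ := F_attained valid ht0 hF
          have : ((k + 1 : Nat) : Int) - 1 = ((k : Nat) : Int) := by push_cast; ring
          rw [this] at hFp
          have huT : (target.toNat : Int) = target := by omega
          set s : Int := target - u with hsdef
          have hs0 : 0 ≤ s := by omega
          have hst : s < target := by omega
          have hsn : s.toNat = target.toNat - u.toNat := by omega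
          have hsmem : s ∈ frontier := (hfr s).2 ⟨hs0, hst, by rw [hsn]; exact hFp⟩
          exact hhit ⟨s, hsmem, u, hu, by omega⟩
        -- characterize nxt
        set nxt : PySem.Set Int := frontier.foldl (fun acc s =>
          valid.foldl (fun (acc : PySem.Set Int) w =>
            if s + w < target ∧ (s + w) ∉ visited then acc.add (s + w) else acc) acc)
          PySem.Set.empty with hnxtdef
        have hnxt : ∀ y : Int, y ∈ nxt ↔
            0 ≤ y ∧ y < target ∧ F valid y.toNat = some (((k + 1 : Nat) : Nat) : Int) := by
          intro y
          rw [hnxtdef, mem_nxtB]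
          constructor
          · rintro (hy | ⟨s, hs, w, hw, h1, h2, rfl⟩)
            · simp [PySem.Set.empty] at hy
            · obtain ⟨hs0, hst, hsF⟩ := (hfr s).1 hs
              obtain ⟨hw1, hwt⟩ := hval w hw
              refine ⟨by omega, h1, ?_⟩
              have hwT : w.toNat ≤ (s + w).toNat := by omega
              have hsub : (s + w).toNat - w.toNat = s.toNat := by omega
              have hcand := F_le_cand valid hw hw1 hwT
              rw [hsub, hsF] at hcand
              cases hF : F valid (s + w).toNat with
              | none => rw [hF] at hcand; exact absurd hcand (by simp [ole])
              | some v =>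
                  rw [hF] at hcand
                  have hle : v ≤ (k : Int) + 1 := by simpa [ole] using hcand
                  have h0 := F_nonneg valid _ _ hF
                  have hv : v = (k : Int) + 1 := by
                    by_contra hne
                    have hvk : v ≤ (k : Int) := by omega
                    have hc : ((v.toNat : Nat) : Int) = v := by omega
                    exact h2 ((hvis (s + w)).2 ⟨by omega, h1, v.toNat, by omega,
                      by rw [hF, hc]⟩)
                  rw [hv]
                  congr 1
          · rintro ⟨hy0, hyt, hyF⟩
            right
            have hy0' : 0 < y.toNat := by
              by_contra h
              have : y.toNat = 0 := by omega
              rw [this, F_zero] at hyF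
              simp at hyF
              omega
            obtain ⟨u, hu, hu1, hut, hFp⟩ := F_attained valid hy0' hyF
            have : (((k + 1 : Nat) : Nat) : Int) - 1 = ((k : Nat) : Int) := by push_cast; ring
            rw [this] at hFp
            have hyT : (y.toNat : Int) = y := by omega
            set s : Int := y - u with hsdef
            have hs0 : 0 ≤ s := by omega
            have hsn : s.toNat = y.toNat - u.toNat := by omega
            have hsmem : s ∈ frontier := (hfr s).2 ⟨hs0, by omega, by rw [hsn]; exact hFp⟩
            refine ⟨s, hsmem, u, hu, by omega, ?_, by omega⟩
            intro hmem
            obtain ⟨_, _, j, hj, hjF⟩ := (hvis (s + u)).1 hmem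
            rw [show s + u = y by omega] at hjF
            rw [hyF] at hjF
            have : ((k + 1 : Nat) : Int) = ((j : Nat) : Int) := by injection hjF
            omega
        by_cases hempty : nxt = ([] : PySem.Set Int)
        · rw [if_pos hempty]
          -- every later level is empty: F target.toNat = none
          have hlvl : ∀ t : Nat, t ≤ target.toNat → F valid t ≠ some ((k + 1 : Nat) : Int) := by
            intro t ht hF
            by_cases hTt : t = target.toNat
            · exact hmiss' (by rw [← hTt]; exact hF)
            · have hmem : (t : Int) ∈ nxt := (hnxt (t : Int)).2
                ⟨by omega, by omega, by simpa using hF⟩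
              rw [hempty] at hmem
              cases hmem
          have hall := levels_empty valid target.toNat k hlvl
          show (-1 : Int) = enc (F valid target.toNat)
          cases hF : F valid target.toNat with
          | none => rfl
          | some m =>
              exfalso
              have h0 := F_nonneg valid _ _ hF
              have hm : ((m.toNat : Nat) : Int) = m := by omega
              by_cases hle : m.toNat ≤ k
              · exact hmiss m.toNat hle (by rw [hF, hm])
              · exact hall m.toNat (by omega) target.toNat le_rfl (by rw [hF, hm])
        · rw [if_neg hempty]
          refine ih (k + 1) (PySem.Set.union visited nxt) nxt hnxt ?_ ?_ ?_
          · intro t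
            rw [PySem.Set.mem_union, hvis, hnxt]
            constructor
            · rintro (⟨h0, h1, j, hj, hF⟩ | ⟨h0, h1, hF⟩)
              · exact ⟨h0, h1, j, by omega, hF⟩
              · exact ⟨h0, h1, k + 1, le_rfl, hF⟩
            · rintro ⟨h0, h1, j, hj, hF⟩
              by_cases hjk : j ≤ k
              · exact Or.inl ⟨h0, h1, j, hjk, hF⟩
              · have : j = k + 1 := by omega
                exact Or.inr ⟨h0, h1, by rw [← this]; exact hF⟩
          · intro j hj
            by_cases hjk : j ≤ k
            · exact hmiss j hjk
            · have : j = k + 1 := by omega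
              rw [this]
              exact hmiss'
          · intro m hF
            have := hbound m hF
            push_cast
            push_cast at this
            omega

-- ===== VERDICT (by name: the statement is the Claim_ definition above) =====
theorem knapsack_min_items_unbounded_spec : Claim_equal_knapsack_min_items_unbounded := by
  intro weights target _
  unfold Spec_knapsack_min_items_unbounded knapsack_min_items_unbounded knapsack_min_items_unbounded_alt
  have hsan : sanitize_weights_b weights target = sanitize_weights weights target := rfl
  rw [hsan]
  by_cases h0 : target = 0
  · simp [h0]
  · by_cases hv : sanitize_weights weights target = []
    · simp [h0, hv]
    · have htpos : 0 < target := by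
        rcases lt_trichotomy target 0 with h | h | h
        · exact absurd (by unfold sanitize_weights; rw [if_pos (by omega)]) hv
        · exact absurd h h0
        · exact h
      simp only [if_neg h0, if_neg hv]
      set T := target.toNat with hT
      have hmem : ∀ u ∈ sanitize_weights weights target, 1 ≤ u ∧ u ≤ (T : Int) := by
        intro u hu
        unfold sanitize_weights at hu
        rw [if_neg (by omega)] at hu
        simp only [List.mem_filter, Bool.and_eq_true, decide_eq_true_eq] at hu
        exact ⟨hu.2.1, by omega⟩
      -- A's side: the table ends at F valid T
      obtain ⟨hlenA, hA⟩ := outerA T (sanitize_weights weights target) []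
        hmem (by intro u hu; cases hu)
        (some 0 :: List.replicate T none) (by simp) (initA T)
      have hinit : ((Array.replicate (T + 1) (none : Option Int)).setIfInBounds 0 (some 0)).toList
          = some 0 :: List.replicate T none := by
        rw [Array.toList_setIfInBounds, Array.toList_replicate, List.replicate_succ,
          List.set_cons_zero]
      rw [arr_getD, toList_outerA_fold, hinit]
      rw [hA T le_rfl, List.nil_append]
      -- B's side: the BFS computes enc (F valid T)
      have hTt : (T : Int) = target := by omega
      have hB := bfs_correct (sanitize_weights weights target) target
        (fun u hu => ⟨(hmem u hu).1, by have := (hmem u hu).2; omega⟩) htpos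
        T 0 (PySem.Set.ofList [0]) (PySem.Set.ofList [0])
        (by
          intro t
          rw [PySem.Set.mem_ofList]
          simp only [List.mem_singleton]
          constructor
          · rintro rfl
            exact ⟨le_rfl, htpos, by rw [show (0 : Int).toNat = 0 from rfl, F_zero]; norm_num⟩
          · rintro ⟨h0, h1, hF⟩
            have := F_eq_zero (sanitize_weights weights target) (by simpa using hF)
            omega)
        (by
          intro t
          rw [PySem.Set.mem_ofList]
          simp only [List.mem_singleton]
          constructor
          · rintro rfl
            exact ⟨le_rfl, htpos, 0, le_rfl, by rw [show (0 : Int).toNat = 0 from rfl, F_zero]; norm_num⟩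
          · rintro ⟨h0, h1, j, hj, hF⟩
            have hj0 : j = 0 := by omega
            rw [hj0] at hF
            have := F_eq_zero (sanitize_weights weights target) (by simpa using hF)
            omega)
        (by
          intro j hj hF
          have hj0 : j = 0 := by omega
          rw [hj0] at hF
          have := F_eq_zero (sanitize_weights weights target) (by simpa using hF)
          omega)
        (by
          intro m hF
          have := F_le_self (sanitize_weights weights target) _ _ hF
          omega)
      rw [show (0 : Nat) + 1 = 1 from rfl] at hB
      rw [hB]
      cases F (sanitize_weights weights target) T <;> rfl
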